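-- pv_equiv track=rewrite | github.com/mapswipe/python-mapswipe-workers | mapswipe_workers/mapswipe_workers/generate_stats/tasking_manager_geometries.py | get_neighbour_list
-- ===== SOURCE A (Python) =====
-- def check_list_sum(x, range_val):
--     """
--     This checks if a give tile belongs to the defined "star"-shaped neighbourhood
--     """
--
--     item_sum = abs(x[0]) + abs(x[1])
--     if item_sum <= range_val:
--         return True
--     else:
--         return False
--
-- def get_neighbour_list(neighbourhood_shape: str, neighbourhood_size: int) -> list:
--     """
--     Filters tiles that are neighbours.
--     This is based on a given search radius (neighbourhood size) and search window shape (neighbourhood shape=.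
--     """
--
--     neighbour_list = []
--     range_val = int(neighbourhood_size / 2)
--     for i in range(-range_val, range_val + 1):
--         for j in range(-range_val, range_val + 1):
--             if i == 0 and j == 0:
--                 pass
--             else:
--                 neighbour_list.append([i, j])
--
--     if neighbourhood_shape == "star":
--         neighbour_list = [x for x in neighbour_list if check_list_sum(x, range_val)]
--
--     return neighbour_list
-- ===== SOURCE B (Python) =====
-- def get_neighbour_list(neighbourhood_shape: str, neighbourhood_size: int) -> list:
--     """Generate the neighbourhood in one bounded pass: for the star shape the
--     inner loop range is shrunk per row instead of building the full square and
--     filtering it afterwards."""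
--     range_val = int(neighbourhood_size / 2)
--     neighbour_list = []
--     for i in range(-range_val, range_val + 1):
--         bound = range_val - abs(i) if neighbourhood_shape == "star" else range_val
--         for j in range(-bound, bound + 1):
--             if (i, j) != (0, 0):
--                 neighbour_list.append([i, j])
--     return neighbour_list
-- ===== Notes on version B (the rewrite author's own statement) =====
-- stated objective: alternative
-- what changed: B generates the star/diamond directly with a per-row inner-loop bound (range_val - |i|) in a single pass, instead of A's build-the-full-square pass followed by a separate filtering pass with a helper predicate.
import Mathlib
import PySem

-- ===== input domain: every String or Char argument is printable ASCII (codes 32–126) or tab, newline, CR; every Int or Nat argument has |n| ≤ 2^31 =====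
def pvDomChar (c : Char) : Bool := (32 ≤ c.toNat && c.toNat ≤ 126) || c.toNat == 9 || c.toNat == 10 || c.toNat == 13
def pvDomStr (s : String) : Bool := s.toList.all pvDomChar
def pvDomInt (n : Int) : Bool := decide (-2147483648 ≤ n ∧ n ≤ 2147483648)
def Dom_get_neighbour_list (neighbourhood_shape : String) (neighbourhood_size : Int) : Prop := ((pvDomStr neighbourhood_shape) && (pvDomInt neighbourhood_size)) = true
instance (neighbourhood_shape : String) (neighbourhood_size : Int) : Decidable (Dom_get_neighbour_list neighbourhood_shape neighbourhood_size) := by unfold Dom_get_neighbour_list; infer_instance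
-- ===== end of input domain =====

-- B generates the star/diamond directly with a per-row inner-loop bound instead of
-- A's build-the-full-square pass followed by a separate filtering pass (objective: alternative).

-- ===== PORT A =====
def check_list_sum (x : List Int) (range_val : Int) : Bool :=
  -- x[0] / x[1]: every x passed here has length 2, so pyGet? is some; getD 0 is exact in context
  let item_sum := |(PySem.List.pyGet? x 0).getD 0| + |(PySem.List.pyGet? x 1).getD 0|
  if item_sum ≤ range_val then true else false

def get_neighbour_list (neighbourhood_shape : String) (neighbourhood_size : Int) : List (List Int) :=
  -- int(neighbourhood_size / 2): float division by 2 is exact for |n| ≤ 2^31, then int() truncates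
  -- toward zero, which is exactly Int.tdiv
  let range_val : Int := neighbourhood_size.tdiv 2
  let neighbour_list : List (List Int) :=
    (PySem.List.pyRange (-range_val) (range_val + 1) 1).foldl (fun acc i =>
      (PySem.List.pyRange (-range_val) (range_val + 1) 1).foldl (fun acc2 j =>
        if i = 0 ∧ j = 0 then acc2 else acc2 ++ [[i, j]]) acc) []
  if neighbourhood_shape == "star" then
    neighbour_list.filter (fun x => check_list_sum x range_val)
  else neighbour_list

-- ===== PORT B =====
def get_neighbour_list_alt (neighbourhood_shape : String) (neighbourhood_size : Int) : List (List Int) :=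
  -- int(neighbourhood_size / 2): same exact truncating division as in A's port
  let range_val : Int := neighbourhood_size.tdiv 2
  (PySem.List.pyRange (-range_val) (range_val + 1) 1).foldl (fun acc i =>
    let bound : Int := if neighbourhood_shape == "star" then range_val - |i| else range_val
    (PySem.List.pyRange (-bound) (bound + 1) 1).foldl (fun acc2 j =>
      if ¬(i = 0 ∧ j = 0) then acc2 ++ [[i, j]] else acc2) acc) []

-- ===== PRECONDITION & SPEC =====
def Spec_get_neighbour_list (neighbourhood_shape : String) (neighbourhood_size : Int) (out : List (List Int)) : Prop := out = get_neighbour_list_alt neighbourhood_shape neighbourhood_size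
instance (neighbourhood_shape : String) (neighbourhood_size : Int) (out : List (List Int)) : Decidable (Spec_get_neighbour_list neighbourhood_shape neighbourhood_size out) := by unfold Spec_get_neighbour_list; infer_instance

-- ===== CLAIM (what is proved, stated in full; the proofs are below) =====
def Claim_equal_get_neighbour_list : Prop := ∀ (neighbourhood_shape : String) (neighbourhood_size : Int), Dom_get_neighbour_list neighbourhood_shape neighbourhood_size → Spec_get_neighbour_list neighbourhood_shape neighbourhood_size (get_neighbour_list neighbourhood_shape neighbourhood_size)

-- ===== LEMMAS AND PROOFS =====

-- a row of the square, as a filtered map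
def pvRow (i : Int) (js : List Int) : List (List Int) :=
  (js.filter (fun j => decide (¬(i = 0 ∧ j = 0)))).map (fun j => [i, j])

theorem pv_innerA (i : Int) (xs : List Int) (acc : List (List Int)) :
    xs.foldl (fun acc2 j => if i = 0 ∧ j = 0 then acc2 else acc2 ++ [[i, j]]) acc
      = acc ++ (xs.filter (fun j => decide (¬(i = 0 ∧ j = 0)))).map (fun j => [i, j]) := by
  induction xs generalizing acc with
  | nil => simp
  | cons x xs ih =>
    rw [List.foldl_cons, List.filter_cons]
    by_cases h : i = 0 ∧ x = 0
    · rw [if_pos h, if_neg (by simp [h])]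
      exact ih acc
    · rw [if_neg h, if_pos (by simp [h]), ih]
      simp

theorem pv_innerB (i : Int) (xs : List Int) (acc : List (List Int)) :
    xs.foldl (fun acc2 j => if ¬(i = 0 ∧ j = 0) then acc2 ++ [[i, j]] else acc2) acc
      = acc ++ (xs.filter (fun j => decide (¬(i = 0 ∧ j = 0)))).map (fun j => [i, j]) := by
  induction xs generalizing acc with
  | nil => simp
  | cons x xs ih =>
    rw [List.foldl_cons, List.filter_cons]
    by_cases h : i = 0 ∧ x = 0
    · rw [if_neg (by simp [h]), if_neg (by simp [h])]
      exact ih acc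
    · rw [if_pos (by simp [h]), if_pos (by simp [h]), ih]
      simp

theorem pv_outer (g : Int → List (List Int)) (f : List (List Int) → Int → List (List Int))
    (hf : ∀ acc i, f acc i = acc ++ g i) (xs : List Int) (acc : List (List Int)) :
    xs.foldl f acc = acc ++ xs.flatMap g := by
  induction xs generalizing acc with
  | nil => simp
  | cons x xs ih => simp [hf, ih]

theorem pv_check (i j r : Int) : check_list_sum [i, j] r = decide (|i| + |j| ≤ r) := by
  simp [check_list_sum, PySem.List.pyGet?, PySem.List.pyIdx?]

theorem pv_filter_range (r b : Int) (h0 : 0 ≤ b) (hbr : b ≤ r) :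
    (PySem.List.pyRange (-r) (r + 1) 1).filter (fun j => decide (|j| ≤ b))
      = PySem.List.pyRange (-b) (b + 1) 1 := by
  rw [PySem.List.pyRange_one_append (-r) (-b) (r + 1) (by omega) (by omega),
      PySem.List.pyRange_one_append (-b) (b + 1) (r + 1) (by omega) (by omega)]
  rw [List.filter_append, List.filter_append]
  have h1 : (PySem.List.pyRange (-r) (-b) 1).filter (fun j => decide (|j| ≤ b)) = [] := by
    rw [List.filter_eq_nil_iff]
    intro j hj
    rw [PySem.List.mem_pyRange_one] at hj
    simp only [decide_eq_true_eq]
    rcases abs_cases j with ⟨he, _⟩ | ⟨he, _⟩ <;> omega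
  have h2 : (PySem.List.pyRange (-b) (b + 1) 1).filter (fun j => decide (|j| ≤ b))
      = PySem.List.pyRange (-b) (b + 1) 1 := by
    rw [List.filter_eq_self]
    intro j hj
    rw [PySem.List.mem_pyRange_one] at hj
    simp only [decide_eq_true_eq]
    rcases abs_cases j with ⟨he, _⟩ | ⟨he, _⟩ <;> omega
  have h3 : (PySem.List.pyRange (b + 1) (r + 1) 1).filter (fun j => decide (|j| ≤ b)) = [] := by
    rw [List.filter_eq_nil_iff]
    intro j hj
    rw [PySem.List.mem_pyRange_one] at hj
    simp only [decide_eq_true_eq]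
    rcases abs_cases j with ⟨he, _⟩ | ⟨he, _⟩ <;> omega
  rw [h1, h2, h3]; simp

theorem pv_row_filter (r i : Int) (hi : -r ≤ i ∧ i ≤ r) :
    (pvRow i (PySem.List.pyRange (-r) (r + 1) 1)).filter (fun x => check_list_sum x r)
      = pvRow i (PySem.List.pyRange (-(r - |i|)) (r - |i| + 1) 1) := by
  unfold pvRow
  rw [List.filter_map]
  have hcomp : ((fun x => check_list_sum x r) ∘ fun j => [i, j]) = fun j => decide (|i| + |j| ≤ r) := by
    funext j; simp [Function.comp, pv_check]
  rw [hcomp, List.filter_comm]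
  congr 1
  have : (PySem.List.pyRange (-r) (r + 1) 1).filter (fun j => decide (|i| + |j| ≤ r))
      = (PySem.List.pyRange (-r) (r + 1) 1).filter (fun j => decide (|j| ≤ r - |i|)) := by
    apply List.filter_congr; intro j _
    simp only [decide_eq_decide]; omega
  have habs : |i| ≤ r := abs_le.mpr ⟨hi.1, hi.2⟩
  have h0 : 0 ≤ |i| := abs_nonneg i
  rw [this, pv_filter_range r (r - |i|) (by omega) (by omega)]

theorem pv_flatMap_congr (xs : List Int) (f g : Int → List (List Int))
    (h : ∀ i ∈ xs, f i = g i) : xs.flatMap f = xs.flatMap g := by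
  induction xs with
  | nil => rfl
  | cons x xs ih =>
    simp only [List.flatMap_cons]
    rw [h x (by simp), ih (fun i hi => h i (by simp [hi]))]

-- ===== VERDICT (by name: the statement is the Claim_ definition above) =====
theorem get_neighbour_list_spec : Claim_equal_get_neighbour_list := by
  intro shape size _
  unfold Spec_get_neighbour_list get_neighbour_list get_neighbour_list_alt
  set r := size.tdiv 2
  have hA : ∀ acc, (PySem.List.pyRange (-r) (r + 1) 1).foldl (fun acc i =>
      (PySem.List.pyRange (-r) (r + 1) 1).foldl (fun acc2 j =>
        if i = 0 ∧ j = 0 then acc2 else acc2 ++ [[i, j]]) acc) acc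
      = acc ++ (PySem.List.pyRange (-r) (r + 1) 1).flatMap
          (fun i => pvRow i (PySem.List.pyRange (-r) (r + 1) 1)) :=
    fun acc => pv_outer _ _ (fun acc i => pv_innerA i _ acc) _ acc
  by_cases hs : shape == "star"
  · simp only [hs, if_true]
    have hB : (PySem.List.pyRange (-r) (r + 1) 1).foldl (fun acc i =>
        (PySem.List.pyRange (-(r - |i|)) ((r - |i|) + 1) 1).foldl (fun acc2 j =>
          if ¬(i = 0 ∧ j = 0) then acc2 ++ [[i, j]] else acc2) acc) []
        = (PySem.List.pyRange (-r) (r + 1) 1).flatMap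
            (fun i => pvRow i (PySem.List.pyRange (-(r - |i|)) (r - |i| + 1) 1)) := by
      have := pv_outer (fun i => pvRow i (PySem.List.pyRange (-(r - |i|)) (r - |i| + 1) 1))
        (fun acc i => (PySem.List.pyRange (-(r - |i|)) ((r - |i|) + 1) 1).foldl (fun acc2 j =>
          if ¬(i = 0 ∧ j = 0) then acc2 ++ [[i, j]] else acc2) acc)
        (fun acc i => pv_innerB i _ acc) (PySem.List.pyRange (-r) (r + 1) 1) []
      simpa using this
    rw [hA, List.nil_append, List.filter_flatMap]
    have hrows : ∀ i ∈ PySem.List.pyRange (-r) (r + 1) 1,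
        (pvRow i (PySem.List.pyRange (-r) (r + 1) 1)).filter (fun x => check_list_sum x r)
          = pvRow i (PySem.List.pyRange (-(r - |i|)) (r - |i| + 1) 1) := by
      intro i hi
      rw [PySem.List.mem_pyRange_one] at hi
      exact pv_row_filter r i ⟨hi.1, by omega⟩
    rw [pv_flatMap_congr _ _ _ hrows, ← hB]
  · simp only [hs, if_false, Bool.false_eq_true]
    have hB : (PySem.List.pyRange (-r) (r + 1) 1).foldl (fun acc i =>
        (PySem.List.pyRange (-r) (r + 1) 1).foldl (fun acc2 j =>
          if ¬(i = 0 ∧ j = 0) then acc2 ++ [[i, j]] else acc2) acc) []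
        = (PySem.List.pyRange (-r) (r + 1) 1).flatMap
            (fun i => pvRow i (PySem.List.pyRange (-r) (r + 1) 1)) := by
      have := pv_outer (fun i => pvRow i (PySem.List.pyRange (-r) (r + 1) 1))
        _ (fun acc i => pv_innerB i _ acc) (PySem.List.pyRange (-r) (r + 1) 1) []
      simpa using this
    rw [hA, List.nil_append]
    simp only [← hB]
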